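-- pv_equiv track=rewrite | github.com/anibalm3/MatrixAnalysisSteenrodTwo | Steenrod System v2.0.py | get_tensor_gr_gen
-- ===== SOURCE A (Python) =====
-- import itertools
--
-- def get_gr_gen(dim):
--     '''returns the list whose d-entry is the lexicographically ordered list of
--     d-faces of the (dim)-simplex'''
--
--     gr_gen = []
--     for i in range(dim+1):
--         els = [list(x) for x in itertools.combinations(set(range(dim+1)), i+1)]
--         gr_gen.append(els)
--
--     return gr_gen
--
-- def get_tensor_gr_gen(dim):
--     '''returns the list whose d-entry is the lexicographically ordered list of pairs of faces
--     of the (dim)-simplex whose dimensions add to d'''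
--
--     gr_gen = get_gr_gen(dim)
--     tensor_gr_gen = []
--     for i in range (2*dim+1): #initializing the array
--         tensor_gr_gen.append([])
--     for i in range(dim+1): #filling the array
--         for j in range(dim+1):
--             els = [list(x) for x in itertools.product(gr_gen[i],gr_gen[j])]
--             tensor_gr_gen[i+j] += els
--     return tensor_gr_gen
-- ===== SOURCE B (Python) =====
-- import itertools
--
-- def get_tensor_gr_gen(dim):
--     '''returns the list whose d-entry is the lexicographically ordered list of pairs of faces
--     of the (dim)-simplex whose dimensions add to d'''
--     faces = [list(c) for k in range(1, dim + 2)
--                      for c in itertools.combinations(range(dim + 1), k)]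
--     buckets = [[] for _ in range(2 * dim + 1)]
--     for a, b in itertools.product(faces, faces):
--         buckets[len(a) + len(b) - 2].append([a, b])
--     return buckets
-- ===== Notes on version B (the rewrite author's own statement) =====
-- stated objective: alternative
-- what changed: Replaces the dimension-grouped structure (build gr_gen grouped by face dimension, then a nested i,j loop taking a cartesian product per dimension pair) by one flat ordered list of all faces and a single pass over all ordered face pairs that buckets each pair arithmetically by len(a)+len(b)-2.
import Mathlib
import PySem

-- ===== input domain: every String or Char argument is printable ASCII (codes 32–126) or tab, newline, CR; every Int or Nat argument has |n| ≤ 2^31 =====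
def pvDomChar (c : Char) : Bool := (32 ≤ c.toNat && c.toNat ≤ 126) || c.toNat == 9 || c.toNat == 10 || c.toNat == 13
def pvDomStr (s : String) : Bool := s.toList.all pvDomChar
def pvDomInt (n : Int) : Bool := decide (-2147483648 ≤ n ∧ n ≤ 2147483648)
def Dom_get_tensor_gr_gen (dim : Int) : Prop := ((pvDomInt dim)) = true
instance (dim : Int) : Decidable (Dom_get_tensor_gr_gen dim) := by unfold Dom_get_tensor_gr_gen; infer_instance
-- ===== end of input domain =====

-- B replaces A's dimension-grouped nested-product construction by one flat face list bucketed
-- arithmetically by len(a)+len(b)-2 (objective: alternative decomposition, same cost).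

-- ===== PORT A =====
-- itertools.combinations over an ascending list of small ints (set(range(n)) iterates
-- ascending in CPython, so this is exact): standard recursive characterization of the
-- positions-lexicographic order combinations produces.
def pvCombos : List Int → Nat → List (List Int)
  | _, 0 => [[]]
  | [], _ + 1 => []
  | x :: xs, k + 1 => (pvCombos xs k).map (fun c => x :: c) ++ pvCombos xs (k + 1)

def get_gr_gen (dim : Int) : List (List (List Int)) :=
  (PySem.List.pyRange 0 (dim + 1) 1).foldl
    (fun acc i => acc ++ [pvCombos (PySem.List.pyRange 0 (dim + 1) 1) (i + 1).toNat]) []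

def get_tensor_gr_gen (dim : Int) : List (List (List (List Int))) :=
  let gr_gen := get_gr_gen dim
  -- buckets are held in an Array so that 'tensor_gr_gen[i+j] += els' extends in amortized
  -- constant time per element, as Python's list += does; same loops, same order
  let init : Array (Array (List (List Int))) :=
    (PySem.List.pyRange 0 (2 * dim + 1) 1).foldl (fun acc _ => acc.push #[]) #[]
  -- indices i, j, i+j are nonnegative here, so .toNat is exact (no Python wraparound arises)
  let res := (PySem.List.pyRange 0 (dim + 1) 1).foldl (fun t i =>
    (PySem.List.pyRange 0 (dim + 1) 1).foldl (fun t j =>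
      let els := (gr_gen.getD i.toNat []).flatMap
        (fun a => (gr_gen.getD j.toNat []).map (fun b => [a, b]))
      t.modify (i + j).toNat (fun bucket => els.foldl Array.push bucket)) t) init
  res.toList.map Array.toList

-- ===== PORT B =====
def get_tensor_gr_gen_alt (dim : Int) : List (List (List (List Int))) :=
  let faces := (PySem.List.pyRange 1 (dim + 2) 1).flatMap
    (fun k => pvCombos (PySem.List.pyRange 0 (dim + 1) 1) k.toNat)
  -- buckets held in an Array so 'buckets[d].append' is amortized constant time, as in Python
  let buckets : Array (Array (List (List Int))) :=
    Array.replicate (2 * dim + 1).toNat #[]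
  -- len(a)+len(b)-2 ≥ 0 since faces are nonempty, so Nat subtraction is exact
  let res := faces.foldl (fun bs a =>
    faces.foldl (fun bs b =>
      bs.modify (a.length + b.length - 2) (fun bucket => bucket.push [a, b])) bs) buckets
  res.toList.map Array.toList

-- ===== PRECONDITION & SPEC =====
def Spec_get_tensor_gr_gen (dim : Int) (out : List (List (List (List Int)))) : Prop := out = get_tensor_gr_gen_alt dim
instance (dim : Int) (out : List (List (List (List Int)))) : Decidable (Spec_get_tensor_gr_gen dim out) := by unfold Spec_get_tensor_gr_gen; infer_instance

-- ===== CLAIM (what is proved, stated in full; the proofs are below) =====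
def Claim_equal_get_tensor_gr_gen : Prop := ∀ (dim : Int), Dom_get_tensor_gr_gen dim → Spec_get_tensor_gr_gen dim (get_tensor_gr_gen dim)

-- ===== LEMMAS AND PROOFS =====

-- One bucket update: append items u.2 at bucket u.1
def pvStep {alpha : Type} (bs : List (List alpha)) (u : Nat × List alpha) : List (List alpha) :=
  bs.modify u.1 (fun l => l ++ u.2)

-- Contents bucket d receives from a list of updates, in order
def pvSel {alpha : Type} (d : Nat) (upds : List (Nat × List alpha)) : List alpha :=
  (upds.filter (fun u => u.1 == d)).flatMap (fun u => u.2)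

lemma pvSel_append {alpha : Type} (d : Nat) (u v : List (Nat × List alpha)) :
    pvSel d (u ++ v) = pvSel d u ++ pvSel d v := by
  simp [pvSel, List.filter_append]

lemma pvFoldl_step {alpha : Type} (upds : List (Nat × List alpha)) (bs : List (List alpha)) :
    upds.foldl pvStep bs
      = (List.range bs.length).map (fun d => bs.getD d [] ++ pvSel d upds) := by
  induction upds generalizing bs with
  | nil =>
    simp only [List.foldl_nil, pvSel, List.filter_nil, List.flatMap_nil, List.append_nil]
    refine (List.ext_getElem (by simp) ?_).symm
    intro i h1 h2
    simp only [List.getElem_map, List.getElem_range] at *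
    rw [List.getD_eq_getElem _ _ (by simpa using h1)]
  | cons u rest ih =>
    rw [List.foldl_cons, ih]
    have hlen : (pvStep bs u).length = bs.length := by simp [pvStep]
    rw [hlen]
    apply List.map_congr_left
    intro d hd
    rw [List.mem_range] at hd
    have h1 : (pvStep bs u).getD d [] =
        if u.1 = d then bs.getD d [] ++ u.2 else bs.getD d [] := by
      rw [List.getD_eq_getElem _ _ (by simpa [pvStep] using hd),
        List.getD_eq_getElem _ _ hd]
      simp [pvStep, List.getElem_modify]
    have h2 : pvSel d (u :: rest) =
        if u.1 = d then u.2 ++ pvSel d rest else pvSel d rest := by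
      simp only [pvSel, List.filter_cons]
      by_cases h : u.1 = d
      · simp [h]
      · simp [h]
    rw [h1, h2]
    by_cases h : u.1 = d <;> simp [h]

lemma pvFoldl_step_replicate {alpha : Type} (upds : List (Nat × List alpha)) (M : Nat) :
    upds.foldl pvStep (List.replicate M ([] : List alpha))
      = (List.range M).map (fun d => pvSel d upds) := by
  rw [pvFoldl_step, List.length_replicate]
  apply List.map_congr_left
  intro d hd
  rw [List.mem_range] at hd
  rw [List.getD_replicate _ hd, List.nil_append]

lemma pvCombos_length : ∀ (xs : List Int) (k : Nat), ∀ c ∈ pvCombos xs k, c.length = k := by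
  intro xs
  induction xs with
  | nil =>
    intro k c hc
    cases k with
    | zero => simp [pvCombos] at hc; simp [hc]
    | succ k => simp [pvCombos] at hc
  | cons x xs ih =>
    intro k c hc
    cases k with
    | zero => simp [pvCombos] at hc; simp [hc]
    | succ k =>
      simp only [pvCombos, List.mem_append, List.mem_map] at hc
      rcases hc with ⟨a, ha, rfl⟩ | h
      · simp [List.length_cons, ih k a ha]
      · exact ih (k + 1) c h

lemma pvFlatMap_if_const {gam del : Type} (P : Prop) [Decidable P] (l : List gam) (f : gam → List del) :
    l.flatMap (fun x => if P then f x else []) = if P then l.flatMap f else [] := by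
  by_cases h : P <;> simp [h]

lemma pvFlatMap_range_if {gam : Type} (N d k : Nat) (f : Nat → List gam) :
    (List.range N).flatMap (fun j => if k + j = d then f j else []) =
      if k ≤ d ∧ d - k < N then f (d - k) else [] := by
  induction N with
  | zero =>
    simp only [List.range_zero, List.flatMap_nil]
    rw [if_neg (by omega)]
  | succ n ih =>
    rw [List.range_succ, List.flatMap_append, ih]
    simp only [List.flatMap_cons, List.flatMap_nil, List.append_nil]
    by_cases h1 : k + n = d
    · rw [if_pos h1, if_neg (by omega), if_pos (by omega), List.nil_append]
      have hdk : d - k = n := by omega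
      rw [hdk]
    · rw [if_neg h1, List.append_nil]
      by_cases h2 : k ≤ d ∧ d - k < n
      · rw [if_pos h2, if_pos (by omega)]
      · rw [if_neg h2, if_neg (by omega)]

-- faces of dimension k-1, as both ports enumerate them
def pvC (dim : Int) (k : Nat) : List (List Int) :=
  pvCombos (PySem.List.pyRange 0 (dim + 1) 1) k

def pvPairs (dim : Int) (i j : Nat) : List (List (List Int)) :=
  (pvC dim (i + 1)).flatMap (fun a => (pvC dim (j + 1)).map (fun b => [a, b]))

def pvUpdsA (dim : Int) : List (Nat × List (List (List Int))) :=
  (List.range (dim + 1).toNat).flatMap (fun i =>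
    (List.range (dim + 1).toNat).map (fun j => (i + j, pvPairs dim i j)))

def pvFaces (dim : Int) : List (List Int) :=
  (List.range (dim + 1).toNat).flatMap (fun k => pvC dim (k + 1))

def pvUpdsB (dim : Int) : List (Nat × List (List (List Int))) :=
  (pvFaces dim).flatMap (fun a =>
    (pvFaces dim).map (fun b => (a.length + b.length - 2, ([[a, b]] : List (List (List Int))))))

lemma pvFoldl_const_append {alpha bet : Type} (l : List bet) (x : alpha) :
    ∀ acc : List alpha, l.foldl (fun acc _ => acc ++ [x]) acc = acc ++ List.replicate l.length x := by
  induction l with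
  | nil => intro acc; simp
  | cons y ys ih =>
    intro acc
    simp [List.foldl_cons, ih, List.replicate_succ]

lemma pvFoldl_append_map {alpha bet : Type} (l : List bet) (f : bet → alpha) :
    ∀ acc : List alpha, l.foldl (fun acc i => acc ++ [f i]) acc = acc ++ l.map f := by
  induction l with
  | nil => intro acc; simp
  | cons y ys ih => intro acc; simp [List.foldl_cons, ih]

lemma pv_gr_gen_eq (dim : Int) :
    get_gr_gen dim = (List.range (dim + 1).toNat).map (fun k => pvC dim (k + 1)) := by
  unfold get_gr_gen
  rw [pvFoldl_append_map, List.nil_append, PySem.List.pyRange_one 0 (dim + 1), List.map_map]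
  simp only [Int.sub_zero]
  apply List.map_congr_left
  intro k _
  have h : ∀ m : Nat, ((0 : Int) + (m : Int) + 1).toNat = m + 1 := by intro m; omega
  simp only [Function.comp_def, h, pvC, PySem.List.pyRange_one, Int.sub_zero]

def pvH {X : Type} (arr : Array (Array X)) : List (List X) :=
  arr.toList.map Array.toList

lemma pvToList_pushAll {X : Type} (els : List X) :
    ∀ arr : Array X, (els.foldl Array.push arr).toList = arr.toList ++ els := by
  induction els with
  | nil => intro arr; simp
  | cons x xs ih => intro arr; simp [List.foldl_cons, ih, Array.toList_push]

lemma pvH_modify {X : Type} (bs : Array (Array X)) (i : Nat)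
    (f : Array X → Array X) (g : List X → List X)
    (hf : ∀ a : Array X, (f a).toList = g a.toList) :
    pvH (bs.modify i f) = (pvH bs).modify i g := by
  unfold pvH
  rw [Array.toList_modify]
  generalize bs.toList = l
  apply List.ext_getElem
  · simp
  · intro j h1 h2
    simp only [List.getElem_map, List.getElem_modify]
    by_cases h : i = j
    · simp [h, hf]
    · simp [h]

lemma pvH_nested_fold {X B1 B2 : Type} (l1 : List B1) (l2 : List B2)
    (idx : B1 → B2 → Nat) (ext : B1 → B2 → List X)
    (farr : B1 → B2 → Array X → Array X)
    (hfarr : ∀ i j (a : Array X), (farr i j a).toList = a.toList ++ ext i j)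
    (init : Array (Array X)) :
    pvH (l1.foldl (fun t i => l2.foldl (fun t j => t.modify (idx i j) (farr i j)) t) init)
      = l1.foldl (fun t i => l2.foldl (fun t j =>
          t.modify (idx i j) (fun l => l ++ ext i j)) t) (pvH init) := by
  refine (List.foldl_hom pvH (fun t i => ?_)).symm
  exact List.foldl_hom pvH (fun t' j =>
    (pvH_modify t' (idx i j) (farr i j) (fun l => l ++ ext i j) (hfarr i j)).symm)

lemma pv_initA_eq (dim : Int) :
    pvH ((PySem.List.pyRange 0 (2 * dim + 1) 1).foldl
        (fun acc _ => acc.push (#[] : Array (List (List Int)))) #[])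
      = List.replicate (2 * dim + 1).toNat [] := by
  unfold pvH
  have h := List.foldl_hom (f := Array.toList)
    (g₁ := fun acc (_ : Int) => acc.push (#[] : Array (List (List Int))))
    (g₂ := fun acc _ => acc ++ [#[]])
    (l := PySem.List.pyRange 0 (2 * dim + 1) 1) (init := #[])
    (fun x _ => Array.toList_push.symm)
  rw [← h]
  simp only [Array.toList_empty]
  rw [pvFoldl_const_append, List.nil_append, PySem.List.length_pyRange_one]
  simp [List.map_replicate]

lemma pvA_list_eq (dim : Int) :
    (PySem.List.pyRange 0 (dim + 1) 1).foldl (fun t i =>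
      (PySem.List.pyRange 0 (dim + 1) 1).foldl (fun t j =>
        t.modify (i + j).toNat (fun l => l ++
          ((get_gr_gen dim).getD i.toNat []).flatMap
            (fun a => ((get_gr_gen dim).getD j.toNat []).map (fun b => [a, b])))) t)
      (List.replicate (2 * dim + 1).toNat [])
    = (List.range (2 * dim + 1).toNat).map (fun d => pvSel d (pvUpdsA dim)) := by
  rw [PySem.List.pyRange_one 0 (dim + 1)]
  simp only [Int.sub_zero, List.foldl_map]
  rw [← pvFoldl_step_replicate (pvUpdsA dim) (2 * dim + 1).toNat]
  show _ = List.foldl pvStep _ (pvUpdsA dim)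
  rw [show pvUpdsA dim = (List.range (dim + 1).toNat).flatMap (fun i =>
      (List.range (dim + 1).toNat).map (fun j => (i + j, pvPairs dim i j))) from rfl,
    List.foldl_flatMap]
  apply PySem.List.foldl_congr_mem
  intro t i hi
  rw [List.foldl_map]
  apply PySem.List.foldl_congr_mem
  intro t' j hj
  rw [List.mem_range] at hi hj
  have hgd : ∀ m, m < (dim + 1).toNat →
      (get_gr_gen dim).getD ((0 : Int) + (m : Int)).toNat [] = pvC dim (m + 1) := by
    intro m hm
    have h0 : ((0 : Int) + (m : Int)).toNat = m := by omega
    rw [h0, pv_gr_gen_eq, List.getD_eq_getElem _ _ (by simpa using hm)]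
    simp
  have hij : ((0 : Int) + (i : Int) + ((0 : Int) + (j : Int))).toNat = i + j := by omega
  rw [hgd i hi, hgd j hj, hij]
  rfl

lemma pvA_eq (dim : Int) :
    get_tensor_gr_gen dim
      = (List.range (2 * dim + 1).toNat).map (fun d => pvSel d (pvUpdsA dim)) := by
  show pvH _ = _
  refine Eq.trans (pvH_nested_fold (X := List (List Int))
    (PySem.List.pyRange 0 (dim + 1) 1) (PySem.List.pyRange 0 (dim + 1) 1)
    (fun i j => (i + j).toNat)
    (fun i j => ((get_gr_gen dim).getD i.toNat []).flatMap
      (fun a => ((get_gr_gen dim).getD j.toNat []).map (fun b => [a, b])))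
    (fun i j bucket => (((get_gr_gen dim).getD i.toNat []).flatMap
      (fun a => ((get_gr_gen dim).getD j.toNat []).map (fun b => [a, b]))).foldl Array.push bucket)
    (fun i j a => pvToList_pushAll _ a) _) ?_
  rw [pv_initA_eq]
  exact pvA_list_eq dim

lemma pvFacesPort_eq (dim : Int) :
    (PySem.List.pyRange 1 (dim + 2) 1).flatMap
        (fun k => pvCombos (PySem.List.pyRange 0 (dim + 1) 1) k.toNat)
      = pvFaces dim := by
  rw [PySem.List.pyRange_one 1 (dim + 2), List.flatMap_map]
  have h21 : (dim + 2 - 1).toNat = (dim + 1).toNat := by omega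
  rw [h21]
  apply List.flatMap_congr
  intro k _
  have h : ((1 : Int) + (k : Int)).toNat = k + 1 := by omega
  rw [h]
  rfl

lemma pvB_list_eq (dim : Int) :
    (pvFaces dim).foldl (fun bs a =>
      (pvFaces dim).foldl (fun bs b =>
        bs.modify (a.length + b.length - 2) (fun l => l ++ [[a, b]])) bs)
      (List.replicate (2 * dim + 1).toNat [])
    = (List.range (2 * dim + 1).toNat).map (fun d => pvSel d (pvUpdsB dim)) := by
  rw [← pvFoldl_step_replicate (pvUpdsB dim) (2 * dim + 1).toNat]
  show _ = List.foldl pvStep _ (pvUpdsB dim)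
  rw [show pvUpdsB dim = (pvFaces dim).flatMap (fun a =>
      (pvFaces dim).map (fun b => (a.length + b.length - 2,
        ([[a, b]] : List (List (List Int)))))) from rfl,
    List.foldl_flatMap]
  apply PySem.List.foldl_congr_mem
  intro bs a _
  rw [List.foldl_map]
  rfl

lemma pvB_eq (dim : Int) :
    get_tensor_gr_gen_alt dim
      = (List.range (2 * dim + 1).toNat).map (fun d => pvSel d (pvUpdsB dim)) := by
  show pvH _ = _
  refine Eq.trans (pvH_nested_fold (X := List (List Int))
    ((PySem.List.pyRange 1 (dim + 2) 1).flatMap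
      (fun k => pvCombos (PySem.List.pyRange 0 (dim + 1) 1) k.toNat))
    ((PySem.List.pyRange 1 (dim + 2) 1).flatMap
      (fun k => pvCombos (PySem.List.pyRange 0 (dim + 1) 1) k.toNat))
    (fun a b => a.length + b.length - 2)
    (fun a b => [[a, b]])
    (fun a b bucket => bucket.push [a, b])
    (fun a b arr => Array.toList_push)
    (Array.replicate (2 * dim + 1).toNat #[])) ?_
  rw [pvFacesPort_eq]
  have hrep : pvH (Array.replicate (2 * dim + 1).toNat (#[] : Array (List (List Int))))
      = List.replicate (2 * dim + 1).toNat [] := by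
    unfold pvH
    rw [Array.toList_replicate]
    simp [List.map_replicate]
  rw [hrep]
  exact pvB_list_eq dim

lemma pvSel_flatMap {alpha gam : Type} (d : Nat) (l : List gam) (f : gam → List (Nat × List alpha)) :
    pvSel d (l.flatMap f) = l.flatMap (fun x => pvSel d (f x)) := by
  induction l with
  | nil => simp [pvSel]
  | cons y ys ih => simp only [List.flatMap_cons, pvSel_append, ih]

lemma pvSel_map {alpha gam : Type} (d : Nat) (l : List gam) (g : gam → Nat × List alpha) :
    pvSel d (l.map g) = l.flatMap (fun x => if (g x).1 = d then (g x).2 else []) := by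
  induction l with
  | nil => simp [pvSel]
  | cons y ys ih =>
    simp only [List.map_cons, List.flatMap_cons, ← ih]
    simp only [pvSel, List.filter_cons]
    by_cases h : (g y).1 = d
    · simp [h]
    · simp [h]

lemma pvSel_eq (dim : Int) (d : Nat) : pvSel d (pvUpdsA dim) = pvSel d (pvUpdsB dim) := by
  have hA : pvSel d (pvUpdsA dim)
      = (List.range (dim + 1).toNat).flatMap (fun i =>
          if i ≤ d ∧ d - i < (dim + 1).toNat then pvPairs dim i (d - i) else []) := by
    unfold pvUpdsA
    rw [pvSel_flatMap]
    apply List.flatMap_congr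
    intro i _
    rw [pvSel_map]
    simpa using pvFlatMap_range_if (dim + 1).toNat d i (fun j => pvPairs dim i j)
  have hB : pvSel d (pvUpdsB dim)
      = (List.range (dim + 1).toNat).flatMap (fun k =>
          if k ≤ d ∧ d - k < (dim + 1).toNat then pvPairs dim k (d - k) else []) := by
    rw [show pvUpdsB dim = ((List.range (dim + 1).toNat).flatMap (fun k => pvC dim (k + 1))).flatMap
        (fun a => ((List.range (dim + 1).toNat).flatMap (fun k => pvC dim (k + 1))).map
          (fun b => (a.length + b.length - 2, ([[a, b]] : List (List (List Int)))))) from rfl,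
      pvSel_flatMap, List.flatMap_assoc]
    apply List.flatMap_congr
    intro k _
    have hstep : ∀ a ∈ pvC dim (k + 1),
        pvSel d (((List.range (dim + 1).toNat).flatMap (fun k => pvC dim (k + 1))).map
            (fun b => (a.length + b.length - 2, ([[a, b]] : List (List (List Int))))))
          = if k ≤ d ∧ d - k < (dim + 1).toNat
            then (pvC dim (d - k + 1)).map (fun b => [a, b]) else [] := by
      intro a ha
      have hal : a.length = k + 1 := pvCombos_length _ _ a ha
      rw [pvSel_map, List.flatMap_assoc]
      have hinner : ∀ l' ∈ List.range (dim + 1).toNat,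
          (pvC dim (l' + 1)).flatMap (fun b =>
              if ((a.length + b.length - 2, ([[a, b]] : List (List (List Int)))).1 = d)
              then ((a.length + b.length - 2, ([[a, b]] : List (List (List Int)))).2) else [])
            = if k + l' = d then (pvC dim (l' + 1)).map (fun b => [a, b]) else [] := by
        intro l' _
        have hcongr : ∀ b ∈ pvC dim (l' + 1),
            (if ((a.length + b.length - 2, ([[a, b]] : List (List (List Int)))).1 = d)
              then ((a.length + b.length - 2, ([[a, b]] : List (List (List Int)))).2) else [])
              = if k + l' = d then ([[a, b]] : List (List (List Int))) else [] := by
          intro b hb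
          have hbl : b.length = l' + 1 := pvCombos_length _ _ b hb
          have harith : a.length + b.length - 2 = k + l' := by omega
          simp only [harith]
        rw [List.flatMap_congr hcongr, pvFlatMap_if_const]
        by_cases h : k + l' = d
        · simp [h, List.map_eq_flatMap]
        · simp [h]
      rw [List.flatMap_congr hinner,
        pvFlatMap_range_if (dim + 1).toNat d k (fun l' => (pvC dim (l' + 1)).map (fun b => [a, b]))]
    rw [List.flatMap_congr hstep, pvFlatMap_if_const]
    rfl
  rw [hA, hB]

theorem pv_main (dim : Int) : get_tensor_gr_gen dim = get_tensor_gr_gen_alt dim := by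
  rw [pvA_eq, pvB_eq]
  apply List.map_congr_left
  intro d _
  exact pvSel_eq dim d

-- ===== VERDICT (by name: the statement is the Claim_ definition above) =====
theorem get_tensor_gr_gen_spec : Claim_equal_get_tensor_gr_gen := by
  intro dim _
  unfold Spec_get_tensor_gr_gen
  exact pv_main dim
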